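-- pv_equiv track=rewrite | github.com/dl10yr/atcoder | atcoder.jp/typical90/typical90_cd/Main.py | count
-- ===== SOURCE A (Python) =====
-- def count(num):
--   i = 1
--   cnt = 0
--   while True:
--     first = pow(10, i - 1) - 1
--     last = min(num, pow(10, i) - 1)
--     cnt += ((last * (last + 1) - first * (first + 1)) // 2) * i
--     if num <= pow(10, i) - 1:
--       return cnt
--     i += 1
-- ===== SOURCE B (Python) =====
-- def count(num):
--     total = 0
--     p = 1
--     while p <= num:
--         total += (num * (num + 1) - (p - 1) * p) // 2
--         p *= 10
--     return total
-- ===== Notes on version B (the rewrite author's own statement) =====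
-- stated objective: simpler
-- what changed: Replaced A's digit-length buckets, each a triangular-number difference weighted by the digit length i, with an unweighted layered sum: for every power of ten p <= num it adds the sum of the run p..num, counting each integer once per digit layer.
-- intended difference: For num <= -2 A's first-bucket triangular formula returns num*(num+1)//2 (a positive value) although the range 1..num is empty, while B returns 0, the intended value of an empty sum. — e.g. on count(-2): A returns 1, B returns 0
import Mathlib
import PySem

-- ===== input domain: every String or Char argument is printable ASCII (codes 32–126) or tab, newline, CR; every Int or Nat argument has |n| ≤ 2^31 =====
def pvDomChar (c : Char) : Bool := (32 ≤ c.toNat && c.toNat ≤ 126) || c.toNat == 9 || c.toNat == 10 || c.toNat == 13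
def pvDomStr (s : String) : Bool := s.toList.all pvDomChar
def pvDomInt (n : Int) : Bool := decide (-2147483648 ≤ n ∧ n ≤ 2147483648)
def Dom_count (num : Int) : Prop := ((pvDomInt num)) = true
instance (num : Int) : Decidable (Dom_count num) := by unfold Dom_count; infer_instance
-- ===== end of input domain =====

-- B replaces A's per-digit-length triangular-number buckets by a direct loop summing
-- k * (digit count of k) over k = 1..num; B returns 0 (the empty sum) for num ≤ -2,
-- where A's formula returns num*(num+1)//2.

-- ===== PORT A =====
-- the 'while True' loop of A; i is Python's i (always ≥ 1 here), cnt the accumulator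
def countLoopA (num : Int) (i : Nat) (cnt : Int) : Int :=
  let first : Int := 10 ^ (i - 1) - 1
  let last : Int := min num (10 ^ i - 1)
  let cnt' := cnt + (PySem.Int.floordiv (last * (last + 1) - first * (first + 1)) 2) * i
  if num ≤ 10 ^ i - 1 then cnt'
  else countLoopA num (i + 1) cnt'
termination_by num.toNat - i
decreasing_by
  have h1 : (i : Nat) < 10 ^ i := Nat.lt_pow_self (by norm_num)
  have h3 : (((10 : Nat) ^ i : Nat) : Int) = (10 : Int) ^ i := by push_cast; ring
  omega

def count (num : Int) : Int := countLoopA num 1 0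

-- ===== PORT B =====
-- the 'while p <= num' loop of B; fuel only makes the recursion total: within the stated
-- domain (|num| ≤ 2^31 < 10^11) the loop runs at most 11 times, so fuel 64 never runs out
def countLoopB (fuel : Nat) (num : Int) (p : Int) (total : Int) : Int :=
  match fuel with
  | 0 => total
  | f + 1 =>
    if p ≤ num then
      countLoopB f num (p * 10) (total + PySem.Int.floordiv (num * (num + 1) - (p - 1) * p) 2)
    else total

def count_alt (num : Int) : Int := countLoopB 64 num 1 0

-- ===== PRECONDITION & SPEC =====
-- For num ≤ -2 A's triangular formula returns num*(num+1)//2 (positive) although the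
-- range 1..num is empty; B returns 0, the intended value of an empty sum.
def D_count (num : Int) : Prop := num ≤ -2
instance (num : Int) : Decidable (D_count num) := by unfold D_count; infer_instance
def Spec_count (num : Int) (out : Int) : Prop := ¬ D_count num → out = count_alt num
instance (num : Int) (out : Int) : Decidable (Spec_count num out) := by unfold Spec_count; infer_instance
def pvDiffWitness_count : Int := (-2)
def pvDiffWitnessOut_count : Int × Int := (1, 0)

-- ===== CLAIM (what is proved, stated in full; the proofs are below) =====
def Claim_unchanged_count : Prop := ∀ (num : Int), Dom_count num → Spec_count num (count num)
def Claim_changed_count : Prop := Dom_count (pvDiffWitness_count) ∧ D_count (pvDiffWitness_count) ∧ count (pvDiffWitness_count) = pvDiffWitnessOut_count.1 ∧ count_alt (pvDiffWitness_count) = pvDiffWitnessOut_count.2 ∧ pvDiffWitnessOut_count.1 ≠ pvDiffWitnessOut_count.2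
def Claim_exact_count : Prop := ∀ (num : Int), Dom_count num → D_count num → count num ≠ count_alt num

-- ===== LEMMAS AND PROOFS =====

-- proof-side helper: the digit count of m (the common yardstick both ports are measured by)
def digLoop (m : Int) (d : Int) : Int :=
  if 0 < m then digLoop (PySem.Int.floordiv m 10) (d + 1) else d
termination_by m.toNat
decreasing_by
  have h1 : PySem.Int.floordiv m 10 = m / 10 := PySem.Int.floordiv_eq_ediv_of_pos (by norm_num)
  have h2 : m / 10 < m := Int.ediv_lt_of_lt_mul (by norm_num) (by omega)
  have h3 : 0 ≤ m / 10 := Int.ediv_nonneg (by omega) (by norm_num)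
  omega

-- proof-side spec: Wsum n = Σ_{k=1}^{n} k * digLoop k 0
def Wsum : Nat → Int
  | 0 => 0
  | n + 1 => Wsum n + ((n : Int) + 1) * digLoop ((n : Int) + 1) 0

theorem digLoop_acc_aux : ∀ (n : Nat) (m d : Int), m.toNat ≤ n → digLoop m d = d + digLoop m 0 := by
  intro n
  induction n with
  | zero =>
    intro m d h
    have : ¬ 0 < m := by omega
    rw [digLoop]
    conv_rhs => rw [digLoop]
    simp [this]
  | succ n ih =>
    intro m d h
    by_cases hm : 0 < m
    · have hfd : PySem.Int.floordiv m 10 = m / 10 := PySem.Int.floordiv_eq_ediv_of_pos (by norm_num)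
      have h2 : m / 10 < m := Int.ediv_lt_of_lt_mul (by norm_num) (by omega)
      have h3 : 0 ≤ m / 10 := Int.ediv_nonneg (by omega) (by norm_num)
      have hle : (PySem.Int.floordiv m 10).toNat ≤ n := by rw [hfd]; omega
      rw [digLoop]
      conv_rhs => rw [digLoop]
      simp only [hm, if_pos]
      rw [ih (PySem.Int.floordiv m 10) (d + 1) hle, ih (PySem.Int.floordiv m 10) (0 + 1) hle]
      ring
    · rw [digLoop]
      conv_rhs => rw [digLoop]
      simp [hm]

theorem digLoop_acc (m d : Int) : digLoop m d = d + digLoop m 0 :=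
  digLoop_acc_aux m.toNat m d le_rfl

theorem digLoop_digits_aux : ∀ (j : Nat) (k : Int), (10 : Int) ^ j ≤ k → k ≤ (10 : Int) ^ (j + 1) - 1 → digLoop k 0 = ((j : Int) + 1) := by
  intro j
  induction j with
  | zero =>
    intro k h1 h2
    norm_num at h1 h2
    rw [digLoop]
    have hk : 0 < k := by omega
    simp only [hk, if_pos]
    have hq : PySem.Int.floordiv k 10 = 0 := by
      have := (PySem.Int.floordiv_eq_iff_of_pos (a := k) (b := 10) (q := 0) (by norm_num)).mpr (by omega)
      exact this
    rw [hq, digLoop]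
    norm_num
  | succ j ih =>
    intro k h1 h2
    have hk : 0 < k := lt_of_lt_of_le (by positivity) h1
    rw [digLoop]
    simp only [hk, if_pos]
    rw [digLoop_acc]
    have hb1 : (10 : Int) ^ j ≤ PySem.Int.floordiv k 10 := by
      rw [PySem.Int.le_floordiv_iff_mul_le (by norm_num)]
      calc (10 : Int) ^ j * 10 = 10 ^ (j + 1) := by ring
        _ ≤ k := h1
    have hb2 : PySem.Int.floordiv k 10 ≤ (10 : Int) ^ (j + 1) - 1 := by
      have : PySem.Int.floordiv k 10 < (10 : Int) ^ (j + 1) := by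
        rw [PySem.Int.floordiv_lt_iff_lt_mul (by norm_num)]
        calc k ≤ 10 ^ (j + 1 + 1) - 1 := h2
          _ < 10 ^ (j + 1) * 10 := by ring_nf; omega
      omega
    rw [ih _ hb1 hb2]
    push_cast
    ring

theorem digLoop_digits (i : Nat) (hi : 1 ≤ i) (k : Int)
    (hk1 : (10 : Int) ^ (i - 1) ≤ k) (hk2 : k ≤ (10 : Int) ^ i - 1) :
    digLoop k 0 = (i : Int) := by
  have h : i - 1 + 1 = i := by omega
  have := digLoop_digits_aux (i - 1) k hk1 (by rw [h]; exact hk2)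
  rw [this]
  omega

theorem bucket_sum (i a : Nat) (d : Nat)
    (h : ∀ k : Nat, a < k → k ≤ a + d → digLoop ((k : Int)) 0 = (i : Int)) :
    2 * (Wsum (a + d) - Wsum a) = (((a : Int) + d) * ((a : Int) + d + 1) - (a : Int) * ((a : Int) + 1)) * i := by
  induction d with
  | zero => push_cast; ring_nf
  | succ d ih =>
    have hdig : digLoop (((a + d : Nat) : Int) + 1) 0 = (i : Int) := by
      have := h (a + d + 1) (by omega) (by omega)
      push_cast at this ⊢
      exact this
    have ih' := ih (fun k hk1 hk2 => h k hk1 (by omega))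
    have hstep : a + (d + 1) = (a + d) + 1 := rfl
    rw [hstep, Wsum, hdig]
    push_cast at ih' ⊢
    linear_combination ih'

theorem bucket_eval (i : Nat) (hi : 1 ≤ i) (b : Int)
    (hb1 : (10 : Int) ^ (i - 1) - 1 ≤ b) (hb2 : b ≤ (10 : Int) ^ i - 1) :
    PySem.Int.floordiv (b * (b + 1) - ((10 : Int) ^ (i - 1) - 1) * ((10 : Int) ^ (i - 1) - 1 + 1)) 2 * (i : Int)
      = Wsum b.toNat - Wsum (10 ^ (i - 1) - 1) := by
  have h10 : 1 ≤ (10 : Nat) ^ (i - 1) := Nat.one_le_pow _ _ (by norm_num)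
  have hAcast : (((10 ^ (i - 1) - 1 : Nat)) : Int) = (10 : Int) ^ (i - 1) - 1 := by
    rw [Nat.cast_sub h10]; push_cast; ring
  have h10I : (1 : Int) ≤ (10 : Int) ^ (i - 1) := one_le_pow₀ (by norm_num)
  have hb0 : 0 ≤ b := by linarith
  have hBcast : ((b.toNat : Nat) : Int) = b := Int.toNat_of_nonneg hb0
  set A : Nat := 10 ^ (i - 1) - 1 with hA
  have hAB : A ≤ b.toNat := by
    have h1 := hb1
    rw [← hAcast, ← hBcast] at h1
    exact_mod_cast h1
  obtain ⟨d, hd⟩ : ∃ d, b.toNat = A + d := ⟨b.toNat - A, by omega⟩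
  have hdigs : ∀ k : Nat, A < k → k ≤ A + d → digLoop (k : Int) 0 = (i : Int) := by
    intro k hk1 hk2
    apply digLoop_digits i hi
    · have h1 : A + 1 ≤ k := hk1
      have h2 : ((A : Nat) : Int) + 1 ≤ (k : Int) := by exact_mod_cast h1
      rw [hAcast] at h2
      linarith
    · have h1 : (k : Int) ≤ ((A + d : Nat) : Int) := by exact_mod_cast hk2
      rw [← hd, hBcast] at h1
      linarith
  have hsum := bucket_sum i A d hdigs
  rw [← hd] at hsum
  have hAD : ((A : Int) + (d : Int)) = b := by
    have h1 : ((A + d : Nat) : Int) = b := by rw [← hd, hBcast]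
    push_cast at h1
    exact h1
  rw [hAD, hAcast] at hsum
  have hEven : Even (b * (b + 1) - ((10 : Int) ^ (i - 1) - 1) * ((10 : Int) ^ (i - 1) - 1 + 1)) :=
    (Int.even_mul_succ_self b).sub (Int.even_mul_succ_self _)
  obtain ⟨m, hm⟩ := hEven
  have hfd : PySem.Int.floordiv (b * (b + 1) - ((10 : Int) ^ (i - 1) - 1) * ((10 : Int) ^ (i - 1) - 1 + 1)) 2 = m := by
    rw [PySem.Int.floordiv_eq_ediv_of_pos (by norm_num)]
    omega
  rw [hfd]
  have h2 : (2 : Int) * (m * (i : Int)) = 2 * (Wsum b.toNat - Wsum A) := by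
    rw [hsum, hm]; ring
  linarith

theorem cast_pow_sub_one (i : Nat) : (((10 ^ i - 1 : Nat)) : Int) = (10 : Int) ^ i - 1 := by
  have h10 : 1 ≤ (10 : Nat) ^ i := Nat.one_le_pow _ _ (by norm_num)
  rw [Nat.cast_sub h10]; push_cast; ring

theorem countLoopA_inv_aux (num : Int) : ∀ (f : Nat) (i : Nat) (cnt : Int), num.toNat - i ≤ f → 1 ≤ i → (10 : Int) ^ (i - 1) - 1 ≤ num →
    countLoopA num i cnt = cnt + Wsum num.toNat - Wsum (10 ^ (i - 1) - 1) := by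
  intro f
  induction f with
  | zero =>
    intro i cnt hf hi hnum
    have h1 : (i : Nat) < 10 ^ i := Nat.lt_pow_self (by norm_num)
    have h3 : (((10 : Nat) ^ i : Nat) : Int) = (10 : Int) ^ i := by push_cast; ring
    have hc : num ≤ (10 : Int) ^ i - 1 := by omega
    rw [countLoopA]
    simp only [hc, if_pos, min_eq_left hc]
    have := bucket_eval i hi num hnum hc
    linarith
  | succ f ihf =>
    intro i cnt hf hi hnum
    rw [countLoopA]
    by_cases hc : num ≤ (10 : Int) ^ i - 1
    · simp only [hc, if_pos, min_eq_left hc]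
      have := bucket_eval i hi num hnum hc
      linarith
    · have hge : (10 : Int) ^ i - 1 ≤ num := by omega
      simp only [if_neg hc, min_eq_right hge]
      have h1 : (i : Nat) < 10 ^ i := Nat.lt_pow_self (by norm_num)
      have h3 : (((10 : Nat) ^ i : Nat) : Int) = (10 : Int) ^ i := by push_cast; ring
      have hmeas : num.toNat - (i + 1) ≤ f := by omega
      have hii : (i + 1) - 1 = i := by omega
      have ih' := ihf (i + 1)
        (cnt + PySem.Int.floordiv (((10 : Int) ^ i - 1) * ((10 : Int) ^ i - 1 + 1) - ((10 : Int) ^ (i - 1) - 1) * ((10 : Int) ^ (i - 1) - 1 + 1)) 2 * (i : Int))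
        hmeas (by omega) (by rw [hii]; exact hge)
      rw [hii] at ih'
      rw [ih']
      have hbound : (10 : Int) ^ (i - 1) - 1 ≤ (10 : Int) ^ i - 1 := by
        have : (10 : Int) ^ (i - 1) ≤ (10 : Int) ^ i :=
          pow_le_pow_right₀ (by norm_num) (by omega)
        linarith
      have hb := bucket_eval i hi ((10 : Int) ^ i - 1) hbound le_rfl
      have htn : ((10 : Int) ^ i - 1).toNat = 10 ^ i - 1 := by
        have := cast_pow_sub_one i
        omega
      rw [htn] at hb
      linarith

theorem countLoopA_inv (num : Int) (i : Nat) (cnt : Int) (hi : 1 ≤ i)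
    (hnum : (10 : Int) ^ (i - 1) - 1 ≤ num) :
    countLoopA num i cnt = cnt + Wsum num.toNat - Wsum (10 ^ (i - 1) - 1) :=
  countLoopA_inv_aux num num.toNat i cnt (by omega) hi hnum

-- B-side development: Vsum j n = Σ_{k=1}^{n} [10^j ≤ k] · k · (digLoop k 0 - j), the value of B's loop from layer p = 10^j on
def Vsum (j : Nat) : Nat → Int
  | 0 => 0
  | n + 1 => Vsum j n + (if 10 ^ j ≤ n + 1 then ((n : Int) + 1) * (digLoop ((n : Int) + 1) 0 - (j : Int)) else 0)

theorem Vsum_zero_of_lt (j : Nat) : ∀ n : Nat, n < 10 ^ j → Vsum j n = 0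
  | 0, _ => rfl
  | n + 1, h => by
    rw [Vsum, Vsum_zero_of_lt j n (by omega), if_neg (by omega)]
    norm_num

theorem layer_step (j : Nat) : ∀ (d : Nat),
    2 * (Vsum j (10 ^ j - 1 + d) - Vsum (j + 1) (10 ^ j - 1 + d))
      = ((10 : Int) ^ j - 1 + d) * ((10 : Int) ^ j + d) - ((10 : Int) ^ j - 1) * (10 : Int) ^ j := by
  have h10 : 1 ≤ (10 : Nat) ^ j := Nat.one_le_pow _ _ (by norm_num)
  have h10' : (10 : Nat) ^ j < 10 ^ (j + 1) := by
    have : (10 : Nat) ^ j * 1 < 10 ^ j * 10 := by omega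
    calc (10 : Nat) ^ j < 10 ^ j * 10 := by omega
      _ = 10 ^ (j + 1) := by ring
  intro d
  induction d with
  | zero =>
    rw [Vsum_zero_of_lt j _ (by omega), Vsum_zero_of_lt (j + 1) _ (by omega)]
    push_cast
    ring
  | succ d ih =>
    have hncast : (((10 ^ j - 1 + d : Nat)) : Int) = (10 : Int) ^ j - 1 + d := by
      push_cast [cast_pow_sub_one j]
      ring
    have hidx : 10 ^ j - 1 + (d + 1) = (10 ^ j - 1 + d) + 1 := rfl
    rw [hidx, Vsum, Vsum]
    rw [if_pos (show 10 ^ j ≤ (10 ^ j - 1 + d) + 1 by omega)]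
    by_cases hc : 10 ^ (j + 1) ≤ (10 ^ j - 1 + d) + 1
    · rw [if_pos hc, hncast]
      push_cast
      push_cast at ih
      linear_combination ih
    · rw [if_neg hc]
      have hdig : digLoop (((10 ^ j - 1 + d : Nat) : Int) + 1) 0 = ((j + 1 : Nat) : Int) := by
        apply digLoop_digits (j + 1) (by omega)
        · simp only [Nat.add_sub_cancel]
          rw [hncast]; linarith
        · rw [hncast]
          have : ((10 ^ j - 1 + d : Nat) : Int) + 1 < ((10 ^ (j + 1) : Nat) : Int) := by
            exact_mod_cast (by omega : 10 ^ j - 1 + d + 1 < 10 ^ (j + 1))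
          rw [hncast] at this
          push_cast at this
          linarith
      rw [hdig, hncast]
      push_cast
      push_cast at ih
      linear_combination ih

theorem Vsum_layer (j : Nat) (n : Nat) (h : 10 ^ j - 1 ≤ n) :
    2 * (Vsum j n - Vsum (j + 1) n)
      = (n : Int) * ((n : Int) + 1) - ((10 : Int) ^ j - 1) * (10 : Int) ^ j := by
  obtain ⟨d, hd⟩ : ∃ d, n = 10 ^ j - 1 + d := ⟨n - (10 ^ j - 1), by omega⟩
  have h10 : 1 ≤ (10 : Nat) ^ j := Nat.one_le_pow _ _ (by norm_num)
  have hncast : ((n : Nat) : Int) = (10 : Int) ^ j - 1 + d := by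
    rw [hd]
    push_cast [cast_pow_sub_one j]
    ring
  rw [hd, layer_step j d, ← hd, hncast]
  ring

theorem Vsum_zero_eq_Wsum : ∀ n : Nat, Vsum 0 n = Wsum n := by
  intro n
  induction n with
  | zero => rfl
  | succ n ih =>
    rw [Vsum, Wsum, ih, if_pos (by omega)]
    push_cast
    ring

theorem countLoopB_inv : ∀ (f j : Nat) (num total : Int), 0 ≤ num → num < (10 : Int) ^ (j + f) →
    countLoopB f num ((10 : Int) ^ j) total = total + Vsum j num.toNat := by
  intro f
  induction f with
  | zero =>
    intro j num total h0 hlt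
    have hcp : (((10 ^ j : Nat)) : Int) = (10 : Int) ^ j := by push_cast; ring
    have hlt' : num < (10 : Int) ^ j := by rwa [Nat.add_zero] at hlt
    have hz : Vsum j num.toNat = 0 := Vsum_zero_of_lt j _ (by omega)
    rw [countLoopB, hz]
    ring
  | succ f ih =>
    intro j num total h0 hlt
    have hcp : (((10 ^ j : Nat)) : Int) = (10 : Int) ^ j := by push_cast; ring
    rw [countLoopB]
    by_cases hc : (10 : Int) ^ j ≤ num
    · rw [if_pos hc]
      rw [show ((10 : Int) ^ j) * 10 = (10 : Int) ^ (j + 1) from by ring]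
      have hnext : num < (10 : Int) ^ (j + 1 + f) := by
        rw [show j + 1 + f = j + (f + 1) from by omega]
        exact hlt
      rw [ih (j + 1) num _ h0 hnext]
      have hlay := Vsum_layer j num.toNat (by omega)
      rw [Int.toNat_of_nonneg h0] at hlay
      have hEv : Even (num * (num + 1) - ((10 : Int) ^ j - 1) * (10 : Int) ^ j) := by
        have h1 : Even (num * (num + 1)) := Int.even_mul_succ_self num
        have h2 : Even (((10 : Int) ^ j - 1) * ((10 : Int) ^ j - 1 + 1)) := Int.even_mul_succ_self _
        have h2' : Even (((10 : Int) ^ j - 1) * (10 : Int) ^ j) := by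
          have : ((10 : Int) ^ j - 1) * ((10 : Int) ^ j - 1 + 1) = ((10 : Int) ^ j - 1) * (10 : Int) ^ j := by ring
          rwa [this] at h2
        exact h1.sub h2'
      obtain ⟨m, hm⟩ := hEv
      have hfd : PySem.Int.floordiv (num * (num + 1) - ((10 : Int) ^ j - 1) * (10 : Int) ^ j) 2 = m := by
        rw [PySem.Int.floordiv_eq_ediv_of_pos (by norm_num)]
        omega
      rw [hfd]
      linarith
    · rw [if_neg hc]
      have hz : Vsum j num.toNat = 0 := Vsum_zero_of_lt j _ (by omega)
      rw [hz]
      ring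

theorem count_alt_eq_Wsum (num : Int) (h0 : 0 ≤ num) (hub : num ≤ 2147483648) :
    count_alt num = Wsum num.toNat := by
  have hlt : num < (10 : Int) ^ (0 + 64) := by
    calc num ≤ 2147483648 := hub
      _ < (10 : Int) ^ (0 + 64) := by norm_num
  have h := countLoopB_inv 64 0 num 0 h0 hlt
  norm_num at h
  rw [count_alt, h, Vsum_zero_eq_Wsum]

-- ===== VERDICT (by name: the statement is the Claim_ definition above) =====
theorem count_spec : Claim_unchanged_count := by
  intro num hdom
  unfold Spec_count D_count
  intro hD
  have hub : num ≤ 2147483648 := by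
    unfold Dom_count pvDomInt at hdom
    simp only [decide_eq_true_eq] at hdom
    exact hdom.2
  by_cases h0 : 0 ≤ num
  · rw [count]
    have hinv := countLoopA_inv num 1 0 le_rfl (by norm_num; exact h0)
    rw [hinv]
    have hb := count_alt_eq_Wsum num h0 hub
    norm_num [Wsum]
    linarith
  · have hneg : num = -1 := by omega
    subst hneg
    rw [count, countLoopA]
    norm_num [PySem.Int.floordiv]
    decide

theorem count_changed : Claim_changed_count := by
  unfold Claim_changed_count pvDiffWitness_count pvDiffWitnessOut_count
  refine ⟨by decide, by unfold D_count; decide, ?_, by decide, by decide⟩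
  rw [count, countLoopA]
  norm_num [PySem.Int.floordiv]

theorem count_tight : Claim_exact_count := by
  intro num _ hD
  unfold D_count at hD
  rw [count, countLoopA]
  have h9 : num ≤ 10 ^ 1 - 1 := by omega
  simp only [if_pos h9, min_eq_left h9]
  have halt : count_alt num = 0 := by
    rw [count_alt, countLoopB, if_neg (by omega : ¬ (1 : Int) ≤ num)]
  rw [halt]
  have hN : 2 ≤ num * (num + 1) := by nlinarith
  have hfd : PySem.Int.floordiv (num * (num + 1) - (10 ^ (1 - 1) - 1) * (10 ^ (1 - 1) - 1 + 1)) 2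
      = (num * (num + 1)) / 2 := by
    rw [PySem.Int.floordiv_eq_ediv_of_pos (by norm_num)]
    norm_num
  rw [hfd]
  push_cast
  set N := num * (num + 1) with hNdef
  omega
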